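-- pv_equiv track=rewrite | github.com/adhvaithr/Pidentify | UCI_ml_copy.py | valid_file_name
-- ===== SOURCE A (Python) =====
-- def valid_file_name(desired_name: str) -> bool:
--     """
--     Check that the characters within desired name do not include special characters with ascii
--
--     :param str desired_name: tentative name of file
--     :returns: Does it include special characters or not?
--     :rtype: bool
--     """
--
--     valid_characters = [
--         32, 95] + list(range(48, 58)) + list(range(65, 91)) + list(range(97, 123))
--     for char in desired_name:
--         ascii_char = ord(char)
--         if ascii_char not in valid_characters:
--             return False
--     return True
-- ===== SOURCE B (Python) =====
-- import re
--
-- _VALID_NAME_RE = re.compile(r'[A-Za-z0-9 _]*')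
--
-- def valid_file_name(desired_name: str) -> bool:
--     """
--     Check that the characters within desired name do not include special characters with ascii
--
--     :param str desired_name: tentative name of file
--     :returns: Does it include special characters or not?
--     :rtype: bool
--     """
--     return _VALID_NAME_RE.fullmatch(desired_name) is not None
-- ===== Notes on version B (the rewrite author's own statement) =====
-- stated objective: idiomatic
-- what changed: Replaced the per-character loop with a linear membership scan over a 64-element list by a single precompiled regex full-match against the explicit class [A-Za-z0-9 _]*.
import Mathlib
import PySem

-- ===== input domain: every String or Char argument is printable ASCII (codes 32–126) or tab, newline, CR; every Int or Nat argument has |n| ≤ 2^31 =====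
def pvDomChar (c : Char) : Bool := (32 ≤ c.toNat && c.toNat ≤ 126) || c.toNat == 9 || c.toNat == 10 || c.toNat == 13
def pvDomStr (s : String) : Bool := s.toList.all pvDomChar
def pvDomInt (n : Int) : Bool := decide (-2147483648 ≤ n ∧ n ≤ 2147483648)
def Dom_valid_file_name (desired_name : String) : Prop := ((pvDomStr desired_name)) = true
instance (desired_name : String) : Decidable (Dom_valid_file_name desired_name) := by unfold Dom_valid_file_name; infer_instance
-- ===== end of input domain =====

-- B replaces A's per-character scan over a 64-element membership list by a single
-- precompiled regex full-match against the explicit class [A-Za-z0-9 _]* (idiomatic).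

-- ===== PORT A =====
-- the list [32, 95] + list(range(48, 58)) + list(range(65, 91)) + list(range(97, 123))
def pvValidCharacters : List Int :=
  [32, 95] ++ PySem.List.pyRange 48 58 1 ++ PySem.List.pyRange 65 91 1 ++ PySem.List.pyRange 97 123 1

-- the for-loop with early 'return False'
def pvLoopA : List Char → Bool
  | [] => true
  | c :: rest =>
      let ascii_char : Int := (c.toNat : Int)
      if ¬ (ascii_char ∈ pvValidCharacters) then false else pvLoopA rest

def valid_file_name (desired_name : String) : Bool :=
  pvLoopA desired_name.toList

-- ===== PORT B =====
-- regex character class [A-Za-z0-9 _], as the explicit ranges the pattern spells out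
def pvClassChar (c : Char) : Bool :=
  ('A' ≤ c && c ≤ 'Z') || ('a' ≤ c && c ≤ 'z') || ('0' ≤ c && c ≤ '9') || c == ' ' || c == '_'

-- fullmatch of '<class>*' succeeds iff every character of the string is in the class
def valid_file_name_alt (desired_name : String) : Bool :=
  desired_name.toList.all pvClassChar

-- ===== PRECONDITION & SPEC =====
def Spec_valid_file_name (desired_name : String) (out : Bool) : Prop := out = valid_file_name_alt desired_name
instance (desired_name : String) (out : Bool) : Decidable (Spec_valid_file_name desired_name out) := by unfold Spec_valid_file_name; infer_instance

-- ===== CLAIM (what is proved, stated in full; the proofs are below) =====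
def Claim_equal_valid_file_name : Prop := ∀ (desired_name : String), Dom_valid_file_name desired_name → Spec_valid_file_name desired_name (valid_file_name desired_name)

-- ===== LEMMAS AND PROOFS =====
-- membership in A's list of codes coincides with B's character class
theorem pvMem_iff_class (c : Char) :
    ((c.toNat : Int) ∈ pvValidCharacters) ↔ pvClassChar c = true := by
  simp [pvValidCharacters, PySem.List.mem_pyRange_one, pvClassChar,
        Char.le_def, Char.ext_iff]
  simp [UInt32.le_iff_toNat_le, UInt32.ext_iff, Char.toNat_val]
  omega

theorem pvLoopA_eq_all (l : List Char) : pvLoopA l = l.all pvClassChar := by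
  induction l with
  | nil => rfl
  | cons c rest ih =>
      by_cases h : (c.toNat : Int) ∈ pvValidCharacters
      · simp [pvLoopA, h, List.all_cons, (pvMem_iff_class c).mp h, ih]
      · have hc : pvClassChar c = false := by
          cases hcc : pvClassChar c
          · rfl
          · exact absurd ((pvMem_iff_class c).mpr hcc) h
        simp [pvLoopA, h, List.all_cons, hc]

-- ===== VERDICT (by name: the statement is the Claim_ definition above) =====
theorem valid_file_name_spec : Claim_equal_valid_file_name := by
  intro s _
  unfold Spec_valid_file_name valid_file_name valid_file_name_alt
  exact pvLoopA_eq_all s.toList
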